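-- pv_equiv track=rewrite | github.com/Wulfic/Cicada3301 | LiberPrimus/tools/test_community_key.py | vig_f_skip
-- ===== SOURCE A (Python) =====
-- def vig_f_skip(cipher, key):
--     result = []
--     key_pos = 0
--     for c in cipher:
--         if c == 0:  # F - not encrypted, output as-is
--             result.append(c)
--             # Don't advance key
--         else:
--             result.append((c - key[key_pos % len(key)]) % 29)
--             key_pos += 1
--     return result
-- ===== SOURCE B (Python) =====
-- def vig_f_skip(cipher, key):
--     cipher = list(cipher)
--     nz = [c for c in cipher if c != 0]
--     dec = [(c - key[i % len(key)]) % 29 for i, c in enumerate(nz)]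
--     it = iter(dec)
--     return [0 if c == 0 else next(it) for c in cipher]
-- ===== Notes on version B (the rewrite author's own statement) =====
-- stated objective: alternative
-- what changed: Replaces the single counter-threaded loop with a three-pass filter/decrypt/merge decomposition: filter out the nonzero symbols, decrypt that stream with enumerate so the key index is just i % len(key), then merge it back over the original cipher emitting 0 at F positions.
import Mathlib
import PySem

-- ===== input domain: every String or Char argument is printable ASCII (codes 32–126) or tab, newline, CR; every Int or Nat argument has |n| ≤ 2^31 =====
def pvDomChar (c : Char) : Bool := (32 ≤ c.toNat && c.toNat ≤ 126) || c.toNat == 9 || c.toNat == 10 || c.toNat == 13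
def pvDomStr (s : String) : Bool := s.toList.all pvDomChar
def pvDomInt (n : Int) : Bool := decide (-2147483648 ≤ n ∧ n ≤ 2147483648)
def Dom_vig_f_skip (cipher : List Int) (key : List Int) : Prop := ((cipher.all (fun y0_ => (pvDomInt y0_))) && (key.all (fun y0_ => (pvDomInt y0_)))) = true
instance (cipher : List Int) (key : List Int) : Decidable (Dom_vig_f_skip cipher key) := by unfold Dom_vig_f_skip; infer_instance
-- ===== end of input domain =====

-- B replaces A's single counter-threaded loop by a filter / decrypt / merge three-pass
-- decomposition (objective: alternative; same cost).

-- ===== PORT A =====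
-- key[key_pos % len(key)]: inside Pre_ the index is in range (or the branch is unreached),
-- so '.getD 0' never supplies the default there.
def vig_f_skip (cipher : List Int) (key : List Int) : List Int :=
  (cipher.foldl (fun (st : List Int × Int) c =>
      if c = 0 then (st.1 ++ [c], st.2)
      else (st.1 ++ [PySem.Int.mod
              (c - (PySem.List.pyGet? key (PySem.Int.mod st.2 (key.length : Int))).getD 0) 29],
            st.2 + 1))
    (([] : List Int), (0 : Int))).1

-- ===== PORT B =====
-- merge pass: 'next(it)' over the decrypted stream; headD/tail model the iterator, which is
-- never exhausted because the decrypted stream has one entry per nonzero cipher element.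
def vigMerge (cipher : List Int) (dec : List Int) : List Int :=
  match cipher with
  | [] => []
  | c :: cs => if c = 0 then 0 :: vigMerge cs dec
               else dec.headD 0 :: vigMerge cs dec.tail

def vig_f_skip_alt (cipher : List Int) (key : List Int) : List Int :=
  let nz := cipher.filter (fun c => c != 0)
  let dec := (PySem.List.enumerate nz 0).map (fun p =>
      PySem.Int.mod
        (p.2 - (PySem.List.pyGet? key (PySem.Int.mod p.1 (key.length : Int))).getD 0) 29)
  vigMerge cipher dec

-- ===== PRECONDITION & SPEC =====
-- Pre_ excludes only the inputs where Python A raises ZeroDivisionError: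
-- an empty key together with at least one nonzero cipher element.
def Pre_vig_f_skip (cipher : List Int) (key : List Int) : Prop :=
  key ≠ [] ∨ cipher.all (fun c => c == 0) = true
instance (cipher : List Int) (key : List Int) : Decidable (Pre_vig_f_skip cipher key) := by
  unfold Pre_vig_f_skip; infer_instance
def pvWitness_vig_f_skip : List Int × List Int := ([0, 5, 1, 0, 28], [3, 4])

def Spec_vig_f_skip (cipher : List Int) (key : List Int) (out : List Int) : Prop :=
  out = vig_f_skip_alt cipher key
instance (cipher : List Int) (key : List Int) (out : List Int) :
    Decidable (Spec_vig_f_skip cipher key out) := by unfold Spec_vig_f_skip; infer_instance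

-- ===== CLAIM (what is proved, stated in full; the proofs are below) =====
def Claim_equal_vig_f_skip : Prop := ∀ (cipher : List Int) (key : List Int),
  Dom_vig_f_skip cipher key → Pre_vig_f_skip cipher key →
  Spec_vig_f_skip cipher key (vig_f_skip cipher key)

-- ===== LEMMAS AND PROOFS =====

-- common reference form: direct recursion threading the key counter
def vigSpec (key : List Int) : List Int → Int → List Int
  | [], _ => []
  | c :: cs, k =>
      if c = 0 then 0 :: vigSpec key cs k
      else PySem.Int.mod
             (c - (PySem.List.pyGet? key (PySem.Int.mod k (key.length : Int))).getD 0) 29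
           :: vigSpec key cs (k + 1)

theorem vigA_eq_spec (key : List Int) (cipher : List Int) (acc : List Int) (k : Int) :
    (cipher.foldl (fun (st : List Int × Int) c =>
        if c = 0 then (st.1 ++ [c], st.2)
        else (st.1 ++ [PySem.Int.mod
                (c - (PySem.List.pyGet? key (PySem.Int.mod st.2 (key.length : Int))).getD 0) 29],
              st.2 + 1))
      (acc, k)).1 = acc ++ vigSpec key cipher k := by
  induction cipher generalizing acc k with
  | nil => simp [vigSpec]
  | cons c cs ih =>
      by_cases hc : c = 0
      · rw [List.foldl_cons, if_pos hc, ih, vigSpec, if_pos hc, hc]; simp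
      · rw [List.foldl_cons, if_neg hc, ih, vigSpec, if_neg hc]; simp

theorem vigB_eq_spec (key : List Int) (cipher : List Int) (k : Int) :
    vigMerge cipher ((PySem.List.enumerate (cipher.filter (fun c => c != 0)) k).map (fun p =>
        PySem.Int.mod
          (p.2 - (PySem.List.pyGet? key (PySem.Int.mod p.1 (key.length : Int))).getD 0) 29))
      = vigSpec key cipher k := by
  induction cipher generalizing k with
  | nil => simp [vigMerge, vigSpec]
  | cons c cs ih =>
      by_cases hc : c = 0
      · have hf : (c != 0) = false := by simp [hc]
        rw [List.filter_cons, hf, if_neg Bool.false_ne_true]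
        rw [vigMerge, if_pos hc, ih, vigSpec, if_pos hc]
      · have hf : (c != 0) = true := by simp [hc]
        rw [List.filter_cons, hf, if_pos rfl]
        rw [PySem.List.enumerate_cons, List.map_cons, vigMerge, if_neg hc,
            List.headD_cons, List.tail_cons, ih, vigSpec, if_neg hc]

-- ===== VERDICT (by name: the statement is the Claim_ definition above) =====
theorem vig_f_skip_spec : Claim_equal_vig_f_skip := by
  intro cipher key _ _
  unfold Spec_vig_f_skip vig_f_skip vig_f_skip_alt
  rw [vigA_eq_spec, vigB_eq_spec]
  simp
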